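-- pv_equiv track=rewrite | github.com/ewdhp/molecular_physics | quantum_numbers.py | generate_electron_configuration
-- ===== SOURCE A (Python) =====
-- def orbital_name(n, l):
--     """
--     Convert quantum numbers to orbital name (e.g., 1s, 2p, 3d)
--
--     Parameters:
--     -----------
--     n : int
--         Principal quantum number
--     l : int
--         Azimuthal quantum number
--
--     Returns:
--     --------
--     str : Orbital name
--     """
--     l_names = {0: 's', 1: 'p', 2: 'd', 3: 'f', 4: 'g', 5: 'h'}
--     return f"{n}{l_names.get(l, '?')}"
--
-- def max_electrons_in_orbital(l):
--     """
--     Maximum number of electrons in an orbital with given l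
--
--     Parameters:
--     -----------
--     l : int
--         Azimuthal quantum number
--
--     Returns:
--     --------
--     int : Maximum number of electrons (2(2l+1))
--     """
--     return 2 * (2 * l + 1)
--
-- def generate_electron_configuration(Z):
--     """
--     Generate electron configuration for element with atomic number Z
--
--     Parameters:
--     -----------
--     Z : int
--         Atomic number (number of electrons)
--
--     Returns:
--     --------
--     dict : Configuration with orbital occupation
--     """
--     # Aufbau order (n+l rule)
--     orbitals = []
--     for n in range(1, 10):
--         for l in range(n):
--             orbitals.append((n, l))
--
--     # Sort by n+l, then by n
--     orbitals.sort(key=lambda x: (x[0] + x[1], x[0]))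
--
--     config = {}
--     electrons_left = Z
--
--     for n, l in orbitals:
--         if electrons_left <= 0:
--             break
--
--         max_e = max_electrons_in_orbital(l)
--         electrons_in_orbital = min(electrons_left, max_e)
--
--         orbital_label = orbital_name(n, l)
--         config[orbital_label] = electrons_in_orbital
--         electrons_left -= electrons_in_orbital
--
--     return config
-- ===== SOURCE B (Python) =====
-- def orbital_name(n, l):
--     l_names = {0: 's', 1: 'p', 2: 'd', 3: 'f', 4: 'g', 5: 'h'}
--     return f"{n}{l_names.get(l, '?')}"
--
-- def generate_electron_configuration(Z):
--     config = {}
--     electrons_left = Z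
--     # walk the Aufbau diagonals s = n+l directly, no sort needed
--     for s in range(1, 18):
--         if electrons_left <= 0:
--             break
--         for n in range((s + 2) // 2, min(s, 9) + 1):
--             if electrons_left <= 0:
--                 break
--             l = s - n
--             max_e = 2 * (2 * l + 1)
--             e = min(electrons_left, max_e)
--             config[orbital_name(n, l)] = e
--             electrons_left -= e
--     return config
-- ===== Notes on version B (the rewrite author's own statement) =====
-- stated objective: alternative
-- what changed: B generates the Aufbau (n+l, n) filling order directly by iterating the diagonals s=n+l (n from ceil((s+1)/2) to min(s,9)), so the build-all-pairs pass and the sort call disappear.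
import Mathlib
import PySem

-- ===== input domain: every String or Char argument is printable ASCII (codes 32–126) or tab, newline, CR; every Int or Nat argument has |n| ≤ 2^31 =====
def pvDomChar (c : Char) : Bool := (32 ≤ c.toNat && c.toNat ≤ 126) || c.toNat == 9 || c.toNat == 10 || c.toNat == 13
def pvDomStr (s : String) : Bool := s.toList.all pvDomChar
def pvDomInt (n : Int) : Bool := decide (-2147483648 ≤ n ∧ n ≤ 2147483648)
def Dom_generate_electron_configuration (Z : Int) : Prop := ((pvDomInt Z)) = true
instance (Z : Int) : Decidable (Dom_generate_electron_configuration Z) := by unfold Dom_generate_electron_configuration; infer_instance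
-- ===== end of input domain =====

-- B enumerates the Aufbau (n+l, n) order directly by diagonals instead of building all (n,l) pairs and sorting them; return-value equivalence only.

-- ===== PORT A =====
def orbital_name (n l : Int) : String :=
  PySem.Int.toStr n ++
    (PySem.Dict.ofList [((0:Int),"s"),(1,"p"),(2,"d"),(3,"f"),(4,"g"),(5,"h")]).getD l "?"

def max_electrons_in_orbital (l : Int) : Int := 2 * (2 * l + 1)

-- 'for n in range(1,10): for l in range(n): orbitals.append((n,l))'
def rawOrbitals : List (Int × Int) :=
  (PySem.List.pyRange 1 10 1).foldl
    (fun acc n => (PySem.List.pyRange 0 n 1).foldl (fun acc2 l => acc2 ++ [(n, l)]) acc) []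

-- 'orbitals.sort(key=lambda x: (x[0] + x[1], x[0]))'
def aufbauOrder : List (Int × Int) :=
  PySem.List.sorted2 rawOrbitals (fun x => x.1 + x.2) (fun x => x.1)

-- the loop body; the 'break' is the no-op guard (once electrons_left ≤ 0 every later step is skipped)
def gecStep (st : PySem.Dict String Int × Int) (nl : Int × Int) : PySem.Dict String Int × Int :=
  if st.2 ≤ 0 then st
  else
    let max_e := max_electrons_in_orbital nl.2
    let e := min st.2 max_e
    (st.1.insert (orbital_name nl.1 nl.2) e, st.2 - e)

def generate_electron_configuration (Z : Int) : List (String × Int) :=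
  (aufbauOrder.foldl gecStep (PySem.Dict.empty, Z)).1.items

-- ===== PORT B =====
def generate_electron_configuration_alt (Z : Int) : List (String × Int) :=
  ((PySem.List.pyRange 1 18 1).foldl
    (fun st s =>
      if st.2 ≤ 0 then st
      else
        (PySem.List.pyRange (PySem.Int.floordiv (s + 2) 2) (min s 9 + 1) 1).foldl
          (fun st n =>
            if st.2 ≤ 0 then st
            else
              let l := s - n
              let max_e := 2 * (2 * l + 1)
              let e := min st.2 max_e
              (st.1.insert (orbital_name n l) e, st.2 - e))
          st)
    (PySem.Dict.empty, Z)).1.items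

-- ===== PRECONDITION & SPEC =====
def Spec_generate_electron_configuration (Z : Int) (out : List (String × Int)) : Prop := out = generate_electron_configuration_alt Z
instance (Z : Int) (out : List (String × Int)) : Decidable (Spec_generate_electron_configuration Z out) := by unfold Spec_generate_electron_configuration; infer_instance

-- ===== CLAIM (what is proved, stated in full; the proofs are below) =====
def Claim_equal_generate_electron_configuration : Prop := ∀ (Z : Int), Dom_generate_electron_configuration Z → Spec_generate_electron_configuration Z (generate_electron_configuration Z)

-- ===== LEMMAS AND PROOFS =====

-- B's diagonal enumeration, flattened into one list of (n, l) pairs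
def diagFlat : List (Int × Int) :=
  (PySem.List.pyRange 1 18 1).flatMap
    (fun s => (PySem.List.pyRange (PySem.Int.floordiv (s + 2) 2) (min s 9 + 1) 1).map
      (fun n => (n, s - n)))

lemma gecStep_stopped (st : PySem.Dict String Int × Int) (h : st.2 ≤ 0) (x : Int × Int) :
    gecStep st x = st := by
  simp [gecStep, h]

lemma foldl_gecStep_stopped (xs : List (Int × Int)) (st : PySem.Dict String Int × Int)
    (h : st.2 ≤ 0) : xs.foldl gecStep st = st := by
  induction xs with
  | nil => rfl
  | cons x xs ih => simp [List.foldl_cons, gecStep_stopped st h x, ih]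

lemma alt_flatten (outer : List Int) (st : PySem.Dict String Int × Int) :
    outer.foldl
      (fun st s =>
        if st.2 ≤ 0 then st
        else
          (PySem.List.pyRange (PySem.Int.floordiv (s + 2) 2) (min s 9 + 1) 1).foldl
            (fun st n =>
              if st.2 ≤ 0 then st
              else
                let l := s - n
                let max_e := 2 * (2 * l + 1)
                let e := min st.2 max_e
                (st.1.insert (orbital_name n l) e, st.2 - e))
            st)
      st
    = (outer.flatMap
        (fun s => (PySem.List.pyRange (PySem.Int.floordiv (s + 2) 2) (min s 9 + 1) 1).map
          (fun n => (n, s - n)))).foldl gecStep st := by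
  induction outer generalizing st with
  | nil => rfl
  | cons s rest ih =>
    rw [List.foldl_cons, List.flatMap_cons, List.foldl_append, ih]
    congr 1
    by_cases h : st.2 ≤ 0
    · rw [if_pos h, foldl_gecStep_stopped _ _ h]
    · rw [if_neg h, List.foldl_map]
      rfl

lemma aufbauOrder_eq_diagFlat : aufbauOrder = diagFlat := by decide

-- ===== VERDICT (by name: the statement is the Claim_ definition above) =====
theorem generate_electron_configuration_spec : Claim_equal_generate_electron_configuration := by
  intro Z _
  unfold Spec_generate_electron_configuration generate_electron_configuration
    generate_electron_configuration_alt
  rw [alt_flatten, ← diagFlat, ← aufbauOrder_eq_diagFlat]
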